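-- pv_equiv track=rewrite | github.com/Cerid-AI/cerid-ai | scripts/sync-repos.py | strip_internal_deps
-- ===== SOURCE A (Python) =====
-- INTERNAL_DEPS = {"structlog", "stripe"}
--
-- def strip_internal_deps(content: str) -> str:
--     """Remove lines containing internal-only dependencies and their comment blocks."""
--     lines = content.splitlines()
--     out: list[str] = []
--     skip_block = False
--     for line in lines:
--         lower = line.lower().strip()
--         # Check if this is a comment preceding an internal dep
--         if lower.startswith("#") and any(d in lower for d in INTERNAL_DEPS):
--             skip_block = True
--             continue
--         if skip_block and (lower.startswith("#") or not lower):
--             continue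
--         skip_block = False
--         if any(lower.startswith(d) for d in INTERNAL_DEPS):
--             continue
--         out.append(line)
--     return "\n".join(out).rstrip("\n") + "\n"
-- ===== SOURCE B (Python) =====
-- def strip_internal_deps(content: str) -> str:
--     """Remove lines containing internal-only dependencies and their comment blocks."""
--     deps = ("structlog", "stripe")
--     lines = content.splitlines()
--     out: list[str] = []
--     i = 0
--     n = len(lines)
--     while i < n:
--         lower = lines[i].lower().strip()
--         if lower.startswith("#") and any(d in lower for d in deps):
--             # consume the whole comment block: every following comment/blank line
--             i += 1
--             while i < n:
--                 nxt = lines[i].lower().strip()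
--                 if not (nxt.startswith("#") or not nxt):
--                     break
--                 i += 1
--             continue
--         if any(lower.startswith(d) for d in deps):
--             i += 1
--             continue
--         out.append(lines[i])
--         i += 1
--     return "\n".join(out).rstrip("\n") + "\n"
-- ===== Notes on version B (the rewrite author's own statement) =====
-- stated objective: alternative
-- what changed: Replaced the carried skip_block flag with an index-based while loop that, on seeing a dependency comment, consumes the whole following comment/blank block in a nested inner loop.
import Mathlib
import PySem

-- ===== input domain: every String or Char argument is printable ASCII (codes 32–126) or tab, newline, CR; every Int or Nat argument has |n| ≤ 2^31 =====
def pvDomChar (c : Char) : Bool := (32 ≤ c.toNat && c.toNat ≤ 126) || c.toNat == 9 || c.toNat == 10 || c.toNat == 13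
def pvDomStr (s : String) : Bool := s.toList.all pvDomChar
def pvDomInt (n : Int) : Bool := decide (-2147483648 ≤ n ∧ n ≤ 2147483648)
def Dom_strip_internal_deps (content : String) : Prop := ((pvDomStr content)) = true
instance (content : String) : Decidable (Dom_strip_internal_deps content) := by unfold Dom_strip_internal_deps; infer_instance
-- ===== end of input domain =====

-- B replaces A's carried skip_block flag by an index/suffix walk with a nested inner loop
-- that consumes a whole comment/blank block at once (objective: alternative decomposition).

-- shared primitive helper: s.rstrip("\n") (PySem has no chars-argument rstrip);
-- exact: removes exactly the trailing '\n' characters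
def pvRstripNl (cs : List Char) : List Char := (cs.reverse.dropWhile (· == '\n')).reverse

-- ===== PORT A =====
def strip_internal_deps (content : String) : String :=
  String.ofList (pvRstripNl (PySem.Chars.join ['\n']
    ((PySem.Chars.splitlines content.toList).foldl
      (fun (st : List (List Char) × Bool) (line : List Char) =>
        let lower := PySem.Chars.strip (PySem.Chars.lower line)
        if PySem.Chars.startswith lower ['#']
            && (["structlog", "stripe"].any fun d => PySem.Chars.isIn d.toList lower) then
          (st.1, true)
        else if st.2 && (PySem.Chars.startswith lower ['#'] || lower.isEmpty) then
          st
        else if ["structlog", "stripe"].any (fun d => PySem.Chars.startswith lower d.toList) then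
          (st.1, false)
        else
          (st.1 ++ [line], false)) ([], false)).1) ++ ['\n'])

-- ===== PORT B =====
-- the outer while loop over suffixes; the inner block-consuming while loop is the dropWhile
def pvStripLoopB : List (List Char) → List (List Char)
  | [] => []
  | line :: rest =>
    let lower := PySem.Chars.strip (PySem.Chars.lower line)
    if PySem.Chars.startswith lower ['#']
        && (["structlog", "stripe"].any fun d => PySem.Chars.isIn d.toList lower) then
      pvStripLoopB (rest.dropWhile fun l =>
        let nxt := PySem.Chars.strip (PySem.Chars.lower l)
        PySem.Chars.startswith nxt ['#'] || nxt.isEmpty)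
    else if ["structlog", "stripe"].any (fun d => PySem.Chars.startswith lower d.toList) then
      pvStripLoopB rest
    else
      line :: pvStripLoopB rest
termination_by ls => ls.length
decreasing_by
  · exact Nat.lt_succ_of_le (List.length_dropWhile_le _ _)
  · exact Nat.lt_succ_of_le (Nat.le_refl _)
  · exact Nat.lt_succ_of_le (Nat.le_refl _)

def strip_internal_deps_alt (content : String) : String :=
  String.ofList (pvRstripNl (PySem.Chars.join ['\n']
    (pvStripLoopB (PySem.Chars.splitlines content.toList))) ++ ['\n'])

-- ===== PRECONDITION & SPEC =====
def Spec_strip_internal_deps (content : String) (out : String) : Prop := out = strip_internal_deps_alt content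
instance (content : String) (out : String) : Decidable (Spec_strip_internal_deps content out) := by unfold Spec_strip_internal_deps; infer_instance

-- ===== CLAIM (what is proved, stated in full; the proofs are below) =====
def Claim_equal_strip_internal_deps : Prop := ∀ (content : String), Dom_strip_internal_deps content → Spec_strip_internal_deps content (strip_internal_deps content)

-- ===== LEMMAS AND PROOFS =====

-- proof-side names for the three line tests
def pvLow (line : List Char) : List Char := PySem.Chars.strip (PySem.Chars.lower line)
def pvDC (line : List Char) : Bool :=
  PySem.Chars.startswith (pvLow line) ['#']
    && (["structlog", "stripe"].any fun d => PySem.Chars.isIn d.toList (pvLow line))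
def pvCB (line : List Char) : Bool :=
  PySem.Chars.startswith (pvLow line) ['#'] || (pvLow line).isEmpty
def pvDep (line : List Char) : Bool :=
  ["structlog", "stripe"].any fun d => PySem.Chars.startswith (pvLow line) d.toList

-- A's step function with the tests named
def pvStepA (st : List (List Char) × Bool) (line : List Char) : List (List Char) × Bool :=
  if pvDC line then (st.1, true)
  else if st.2 && pvCB line then st
  else if pvDep line then (st.1, false)
  else (st.1 ++ [line], false)

lemma pvStepA_eq :
    (fun (st : List (List Char) × Bool) (line : List Char) =>
      let lower := PySem.Chars.strip (PySem.Chars.lower line)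
      if PySem.Chars.startswith lower ['#']
          && (["structlog", "stripe"].any fun d => PySem.Chars.isIn d.toList lower) then
        (st.1, true)
      else if st.2 && (PySem.Chars.startswith lower ['#'] || lower.isEmpty) then
        st
      else if ["structlog", "stripe"].any (fun d => PySem.Chars.startswith lower d.toList) then
        (st.1, false)
      else
        (st.1 ++ [line], false)) = pvStepA := by
  funext st line
  simp only [pvStepA, pvDC, pvCB, pvDep, pvLow]
  rfl

lemma pvLoopB_cons (x : List Char) (r : List (List Char)) :
    pvStripLoopB (x :: r) =
      if pvDC x then pvStripLoopB (r.dropWhile pvCB)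
      else if pvDep x then pvStripLoopB r
      else x :: pvStripLoopB r := by
  rw [pvStripLoopB]
  rfl

-- A's loop, rephrased as structural recursion on the remaining lines with the flag
def pvProcA : List (List Char) → Bool → List (List Char)
  | [], _ => []
  | x :: r, skip =>
    if pvDC x then pvProcA r true
    else if skip && pvCB x then pvProcA r skip
    else if pvDep x then pvProcA r false
    else x :: pvProcA r false

lemma pvDC_cb {x : List Char} (h : pvDC x = true) : pvCB x = true := by
  unfold pvDC at h; unfold pvCB
  simp only [Bool.and_eq_true] at h
  simp [h.1]

lemma pvFoldA (ls : List (List Char)) : ∀ (out : List (List Char)) (skip : Bool),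
    (ls.foldl pvStepA (out, skip)).1 = out ++ pvProcA ls skip := by
  induction ls with
  | nil => intro out skip; simp [pvProcA]
  | cons x r ih =>
    intro out skip
    rw [List.foldl_cons]
    by_cases h1 : pvDC x
    · rw [show pvStepA (out, skip) x = (out, true) from by simp [pvStepA, h1],
        show pvProcA (x :: r) skip = pvProcA r true from by simp [pvProcA, h1], ih]
    · by_cases h2 : (skip && pvCB x) = true
      · rw [show pvStepA (out, skip) x = (out, skip) from by simp [pvStepA, h1, h2],
          show pvProcA (x :: r) skip = pvProcA r skip from by simp [pvProcA, h1, h2], ih]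
      · by_cases h3 : pvDep x
        · rw [show pvStepA (out, skip) x = (out, false) from by simp [pvStepA, h1, h2, h3],
            show pvProcA (x :: r) skip = pvProcA r false from by simp [pvProcA, h1, h2, h3], ih]
        · rw [show pvStepA (out, skip) x = (out ++ [x], false) from by simp [pvStepA, h1, h2, h3],
            show pvProcA (x :: r) skip = x :: pvProcA r false from by simp [pvProcA, h1, h2, h3], ih]
          simp

lemma pvMain (ls : List (List Char)) :
    pvProcA ls false = pvStripLoopB ls ∧ pvProcA ls true = pvStripLoopB (ls.dropWhile pvCB) := by
  induction ls with
  | nil => constructor <;> simp [pvProcA, pvStripLoopB]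
  | cons x r ih =>
    constructor
    · rw [pvLoopB_cons]
      by_cases h1 : pvDC x
      · rw [show pvProcA (x :: r) false = pvProcA r true from by simp [pvProcA, h1],
          if_pos h1, ih.2]
      · rw [if_neg h1]
        by_cases h3 : pvDep x
        · rw [show pvProcA (x :: r) false = pvProcA r false from by simp [pvProcA, h1, h3],
            if_pos h3, ih.1]
        · rw [show pvProcA (x :: r) false = x :: pvProcA r false from by simp [pvProcA, h1, h3],
            if_neg h3, ih.1]
    · by_cases hcb : pvCB x
      · rw [List.dropWhile_cons_of_pos hcb]
        by_cases h1 : pvDC x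
        · rw [show pvProcA (x :: r) true = pvProcA r true from by simp [pvProcA, h1], ih.2]
        · rw [show pvProcA (x :: r) true = pvProcA r true from by simp [pvProcA, h1, hcb], ih.2]
      · rw [List.dropWhile_cons_of_neg hcb]
        have h1 : ¬ pvDC x = true := fun h => hcb (pvDC_cb h)
        rw [pvLoopB_cons, if_neg h1]
        by_cases h3 : pvDep x
        · rw [show pvProcA (x :: r) true = pvProcA r false from by simp [pvProcA, h1, h3, hcb],
            if_pos h3, ih.1]
        · rw [show pvProcA (x :: r) true = x :: pvProcA r false from by simp [pvProcA, h1, h3, hcb],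
            if_neg h3, ih.1]

-- ===== VERDICT (by name: the statement is the Claim_ definition above) =====
theorem strip_internal_deps_spec : Claim_equal_strip_internal_deps := by
  intro content _
  unfold Spec_strip_internal_deps strip_internal_deps strip_internal_deps_alt
  rw [pvStepA_eq, pvFoldA (PySem.Chars.splitlines content.toList) [] false,
    (pvMain (PySem.Chars.splitlines content.toList)).1]
  simp
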